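-- pv_equiv track=rewrite | github.com/EricBui619/document-extractor | key_value_converter.py | _have_consistent_headers
-- ===== SOURCE A (Python) =====
-- from typing import List, Dict, Tuple, Optional
--
-- def _have_consistent_headers(all_headers: List[List[str]]) -> bool:
--     """
--     Check if all records have the same headers in the same order
--
--     Args:
--         all_headers: List of header lists from each record
--
--     Returns:
--         True if all headers match
--     """
--     if not all_headers:
--         return False
--
--     first_headers = all_headers[0]
--
--     for headers in all_headers[1:]:
--         if headers != first_headers:
--             return False
--
--     return True
-- ===== SOURCE B (Python) =====
-- from typing import List
--
-- def _have_consistent_headers(all_headers: List[List[str]]) -> bool: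
--     if not all_headers:
--         return False
--     return len({tuple(h) for h in all_headers}) == 1
-- ===== Notes on version B (the rewrite author's own statement) =====
-- stated objective: idiomatic
-- what changed: Replaced the compare-each-to-first scan over all_headers[1:] with building a set of distinct header tuples and checking it has exactly one element.
import Mathlib
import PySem

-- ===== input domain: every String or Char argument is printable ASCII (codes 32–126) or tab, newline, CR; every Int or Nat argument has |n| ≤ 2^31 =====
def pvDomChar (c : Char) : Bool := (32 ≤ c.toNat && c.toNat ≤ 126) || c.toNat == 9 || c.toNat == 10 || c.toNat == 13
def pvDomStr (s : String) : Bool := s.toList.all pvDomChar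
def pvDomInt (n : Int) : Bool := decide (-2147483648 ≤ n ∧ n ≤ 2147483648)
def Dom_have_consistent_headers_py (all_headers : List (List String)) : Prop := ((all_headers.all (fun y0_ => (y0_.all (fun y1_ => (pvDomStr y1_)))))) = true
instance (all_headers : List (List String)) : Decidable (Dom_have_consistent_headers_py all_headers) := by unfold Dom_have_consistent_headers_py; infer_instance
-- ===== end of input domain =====

-- B replaces A's compare-each-to-first scan by collecting the distinct header
-- lists into a set and checking it has exactly one element (idiomatic, same cost).

-- ===== PORT A =====
def have_consistent_headers_py (all_headers : List (List String)) : Bool :=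
  if all_headers = [] then false
  else
    let first_headers := all_headers.headD []
    (PySem.List.slice all_headers (some 1) none).all (fun headers => headers == first_headers)

-- ===== PORT B =====
def have_consistent_headers_py_alt (all_headers : List (List String)) : Bool :=
  if all_headers = [] then false
  else PySem.Set.len (PySem.Set.ofList all_headers) == 1

-- ===== PRECONDITION & SPEC =====
def Spec_have_consistent_headers_py (all_headers : List (List String)) (out : Bool) : Prop := out = have_consistent_headers_py_alt all_headers
instance (all_headers : List (List String)) (out : Bool) : Decidable (Spec_have_consistent_headers_py all_headers out) := by unfold Spec_have_consistent_headers_py; infer_instance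

-- ===== CLAIM (what is proved, stated in full; the proofs are below) =====
def Claim_equal_have_consistent_headers_py : Prop := ∀ (all_headers : List (List String)), Dom_have_consistent_headers_py all_headers → Spec_have_consistent_headers_py all_headers (have_consistent_headers_py all_headers)

-- ===== LEMMAS AND PROOFS =====

lemma le_length_foldl_add (t : List (List String)) (s : List (List String)) :
    s.length ≤ (t.foldl PySem.Set.add s).length := by
  induction t generalizing s with
  | nil => simp
  | cons x t ih =>
    simp only [List.foldl_cons]
    refine le_trans ?_ (ih (PySem.Set.add s x))
    simp only [PySem.Set.add]
    split <;> simp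

lemma all_eq_len_one (t : List (List String)) (h : List String) :
    (t.all (fun x => x == h)) = (PySem.Set.len (t.foldl PySem.Set.add [h]) == 1) := by
  induction t with
  | nil => simp [PySem.Set.len]
  | cons x t ih =>
    simp only [List.all_cons, List.foldl_cons]
    by_cases hx : x = h
    · subst hx
      have : PySem.Set.add [x] x = [x] := by simp [PySem.Set.add]
      simp [ih]
    · have hne : (x == h) = false := by simp [hx]
      have hadd : PySem.Set.add [h] x = [h, x] := by
        simp [PySem.Set.add]
        exact fun e => (hx e).elim
      have hlen : 2 ≤ (t.foldl PySem.Set.add [h, x]).length := by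
        simpa using le_length_foldl_add t [h, x]
      simp only [hne, Bool.false_and, hadd]
      symm
      simp only [PySem.Set.len, beq_eq_false_iff_ne, ne_eq]
      intro hc
      omega

-- ===== VERDICT (by name: the statement is the Claim_ definition above) =====
theorem have_consistent_headers_py_spec : Claim_equal_have_consistent_headers_py := by
  intro all_headers _
  unfold Spec_have_consistent_headers_py have_consistent_headers_py have_consistent_headers_py_alt
  cases all_headers with
  | nil => simp
  | cons h t =>
    simp only [reduceCtorEq, if_false, List.headD_cons, PySem.List.slice_from_one, List.tail_cons]
    rw [PySem.Set.ofList_eq_foldl]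
    have : PySem.Set.add ([] : List (List String)) h = [h] := by simp [PySem.Set.add]
    simp only [List.foldl_cons, this]
    exact all_eq_len_one t h
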